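-- pv_equiv track=rewrite | github.com/Denji7k/-Development-of-a-Comprehensive-Toolkit-for-Bioinformatics-Annotation- | motif_shared.py | find_motifs
-- ===== SOURCE A (Python) =====
-- from collections import defaultdict
--
-- def find_motifs(sequences, min_length=6, max_length=12):
--     """Find fixed-length motifs shared across all sequences for lengths from min_length to max_length."""
--     all_shared_motifs = defaultdict(set)
--
--     for motif_length in range(min_length, max_length + 1):
--         motif_count = defaultdict(int)
--         for seq in sequences:
--             seen_motifs = set()
--             for i in range(len(seq) - motif_length + 1):
--                 motif = seq[i:i + motif_length]
--                 if motif not in seen_motifs: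
--                     motif_count[motif] += 1
--                     seen_motifs.add(motif)
--
--         # Filter motifs that are found in all sequences
--         shared_motifs = {motif for motif, count in motif_count.items() if count == len(sequences)}
--         if shared_motifs:
--             all_shared_motifs[motif_length] = shared_motifs
--
--     return all_shared_motifs
-- ===== SOURCE B (Python) =====
-- from collections import defaultdict
--
-- def find_motifs(sequences, min_length=6, max_length=12):
--     """Shared fixed-length motifs as the intersection of per-sequence substring sets."""
--     result = defaultdict(set)
--     if not sequences:
--         return result
--     for length in range(min_length, max_length + 1):
--         common = {sequences[0][i:i + length] for i in range(len(sequences[0]) - length + 1)}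
--         for seq in sequences[1:]:
--             common &= {seq[i:i + length] for i in range(len(seq) - length + 1)}
--         if common:
--             result[length] = common
--     return result
-- ===== Notes on version B (the rewrite author's own statement) =====
-- stated objective: simpler
-- what changed: Replaced the per-length shared count-dictionary with a per-sequence seen-set (count motifs across sequences, then keep those whose count equals len(sequences)) by a direct set intersection: each sequence's substring set is intersected into a running common set, with an explicit guard for the empty sequence list.
import Mathlib
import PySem

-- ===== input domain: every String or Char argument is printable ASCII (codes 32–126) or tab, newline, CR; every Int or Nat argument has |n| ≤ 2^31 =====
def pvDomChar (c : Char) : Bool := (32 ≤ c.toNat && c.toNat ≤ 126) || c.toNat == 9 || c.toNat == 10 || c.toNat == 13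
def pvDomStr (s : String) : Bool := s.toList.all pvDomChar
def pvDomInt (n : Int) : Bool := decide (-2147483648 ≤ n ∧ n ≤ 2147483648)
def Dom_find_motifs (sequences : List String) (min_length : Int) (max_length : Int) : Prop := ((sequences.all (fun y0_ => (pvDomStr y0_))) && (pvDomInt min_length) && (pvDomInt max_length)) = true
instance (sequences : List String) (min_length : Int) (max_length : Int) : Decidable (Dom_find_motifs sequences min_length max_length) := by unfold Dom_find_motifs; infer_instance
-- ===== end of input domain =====

-- B replaces A's count-dictionary bookkeeping by intersecting per-sequence substring sets (simpler; return value only).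

-- ===== PORT A =====
def find_motifs (sequences : List String) (min_length : Int) (max_length : Int) : List (Int × List String) :=
  ((PySem.List.pyRange min_length (max_length + 1) 1).foldl
    (fun (all_shared : PySem.Dict Int (List String)) L =>
      let motif_count : PySem.Dict String Int :=
        sequences.foldl
          (fun cnt seq =>
            ((PySem.List.pyRange 0 (PySem.Str.len seq - L + 1) 1).foldl
              (fun (st : PySem.Dict String Int × PySem.Set String) i =>
                let motif := PySem.Str.slice seq (some i) (some (i + L))
                if st.2.contains motif then st
                else (st.1.modify motif 0 (fun x => x + 1), st.2.add motif))
              (cnt, PySem.Set.empty)).1)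
          PySem.Dict.empty
      let shared : PySem.Set String :=
        PySem.Set.ofList
          ((motif_count.items.filter (fun p => p.2 == (sequences.length : Int))).map (fun p => p.1))
      if shared = [] then all_shared else all_shared.insert L shared)
    PySem.Dict.empty).items

-- ===== PORT B =====
-- B-side helper: the set of length-L substrings of one sequence ({s[i:i+L] for i in range(len(s)-L+1)}).
def subsRaw (s : String) (L : Int) : List String :=
  (PySem.List.pyRange 0 (PySem.Str.len s - L + 1) 1).map
    (fun i => PySem.Str.slice s (some i) (some (i + L)))

def motifSet (s : String) (L : Int) : PySem.Set String :=
  PySem.Set.ofList (subsRaw s L)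

def find_motifs_alt (sequences : List String) (min_length : Int) (max_length : Int) : List (Int × List String) :=
  match sequences with
  | [] => ((PySem.Dict.empty : PySem.Dict Int (List String))).items
  | s0 :: rest =>
    ((PySem.List.pyRange min_length (max_length + 1) 1).foldl
      (fun (result : PySem.Dict Int (List String)) L =>
        let common : PySem.Set String :=
          rest.foldl (fun c seq => c.inter (motifSet seq L)) (motifSet s0 L)
        if common = [] then result else result.insert L common)
      PySem.Dict.empty).items

-- ===== PRECONDITION & SPEC =====
def Spec_find_motifs (sequences : List String) (min_length : Int) (max_length : Int) (out : List (Int × List String)) : Prop := out = find_motifs_alt sequences min_length max_length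
instance (sequences : List String) (min_length : Int) (max_length : Int) (out : List (Int × List String)) : Decidable (Spec_find_motifs sequences min_length max_length out) := by unfold Spec_find_motifs; infer_instance

-- ===== CLAIM (what is proved, stated in full; the proofs are below) =====
def Claim_equal_find_motifs : Prop := ∀ (sequences : List String) (min_length : Int) (max_length : Int), Dom_find_motifs sequences min_length max_length → Spec_find_motifs sequences min_length max_length (find_motifs sequences min_length max_length)

-- ===== LEMMAS AND PROOFS =====

def bumpD (cnt : PySem.Dict String Int) (m : String) : PySem.Dict String Int :=
  cnt.modify m 0 (fun x => x + 1)

def freshList (seen : List String) : List String → List String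
  | [] => []
  | m :: t => if m ∈ seen then freshList seen t else m :: freshList (seen ++ [m]) t

lemma pair_fold (xs : List String) (cnt : PySem.Dict String Int) (seen : PySem.Set String) :
    xs.foldl
      (fun (st : PySem.Dict String Int × PySem.Set String) m =>
        if st.2.contains m then st else (st.1.modify m 0 (fun x => x + 1), st.2.add m))
      (cnt, seen)
    = (List.foldl bumpD cnt (freshList seen xs), seen.update xs) := by
  induction xs generalizing cnt seen with
  | nil => simp [freshList, PySem.Set.update_nil]
  | cons m t ih =>
    by_cases h : m ∈ seen
    · have hc : seen.contains m = true := by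
        rw [PySem.Set.contains_eq_decide]; simp [h]
      simp only [List.foldl_cons, hc, if_pos rfl, PySem.Set.update_cons,
        PySem.Set.add_of_mem h, freshList, if_pos h]
      exact ih cnt seen
    · have hc : seen.contains m = false := by
        rw [PySem.Set.contains_eq_decide]; simp [h]
      simp only [List.foldl_cons, hc, PySem.Set.update_cons, freshList, if_neg h,
        Bool.false_eq_true, if_false, PySem.Set.add_of_not_mem h, List.foldl_cons]
      exact ih _ _

lemma mem_freshList (xs : List String) : ∀ (seen : List String) (y : String),
    y ∈ freshList seen xs ↔ y ∈ xs ∧ y ∉ seen := by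
  induction xs with
  | nil => intro seen y; simp [freshList]
  | cons m t ih =>
    intro seen y
    by_cases h : m ∈ seen
    · simp only [freshList, if_pos h, ih]
      constructor
      · rintro ⟨hy, hns⟩; exact ⟨List.mem_cons_of_mem _ hy, hns⟩
      · rintro ⟨hy, hns⟩
        rcases List.mem_cons.mp hy with rfl | hy
        · exact absurd h hns
        · exact ⟨hy, hns⟩
    · simp only [freshList, if_neg h, List.mem_cons, ih, List.mem_append,
        List.mem_singleton]
      constructor
      · rintro (rfl | ⟨hy, hns⟩)
        · exact ⟨Or.inl rfl, h⟩
        · exact ⟨Or.inr hy, fun hs => hns (Or.inl hs)⟩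
      · rintro ⟨rfl | hy, hns⟩
        · exact Or.inl rfl
        · by_cases hm : y = m
          · exact Or.inl hm
          · exact Or.inr ⟨hy, by simp [hns, hm]⟩

lemma nodup_freshList (xs : List String) : ∀ (seen : List String), (freshList seen xs).Nodup := by
  induction xs with
  | nil => intro seen; simp [freshList]
  | cons m t ih =>
    intro seen
    by_cases h : m ∈ seen
    · simpa [freshList, if_pos h] using ih seen
    · simp only [freshList, if_neg h]
      refine List.nodup_cons.mpr ⟨?_, ih _⟩
      intro hm
      have := (mem_freshList t (seen ++ [m]) m).mp hm
      simp at this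

lemma count_freshList (xs : List String) (y : String) :
    List.count y (freshList [] xs) = (if y ∈ xs then 1 else 0) := by
  by_cases h : y ∈ xs
  · rw [if_pos h]
    exact List.count_eq_one_of_mem (nodup_freshList xs []) ((mem_freshList xs [] y).mpr ⟨h, by simp⟩)
  · rw [if_neg h]
    exact List.count_eq_zero_of_not_mem (fun hm => h ((mem_freshList xs [] y).mp hm).1)

lemma update_freshList (xs : List String) : ∀ (seen : PySem.Set String),
    seen.update (freshList seen xs) = seen.update xs := by
  induction xs with
  | nil => intro seen; simp [freshList]
  | cons m t ih =>
    intro seen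
    by_cases h : m ∈ seen
    · rw [show freshList seen (m :: t) = freshList seen t from by simp [freshList, h],
        PySem.Set.update_cons, PySem.Set.add_of_mem h, ih]
    · rw [show freshList seen (m :: t) = m :: freshList (seen ++ [m]) t from by
          simp [freshList, h],
        PySem.Set.update_cons, PySem.Set.update_cons, PySem.Set.add_of_not_mem h, ih]

lemma freshList_nil_eq_ofList (xs : List String) :
    freshList [] xs = PySem.Set.ofList xs := by
  have h := update_freshList xs []
  rw [PySem.Set.update_nil_left, PySem.Set.update_nil_left] at h
  rw [← h, PySem.Set.ofList_eq_self_of_nodup _ (nodup_freshList xs [])]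

-- the count dictionary built by A for a fixed length L
def cntA (sequences : List String) (L : Int) : PySem.Dict String Int :=
  sequences.foldl (fun cnt seq => List.foldl bumpD cnt (freshList [] (subsRaw seq L)))
    PySem.Dict.empty

lemma innerA (seq : String) (L : Int) (cnt : PySem.Dict String Int) :
    ((PySem.List.pyRange 0 (PySem.Str.len seq - L + 1) 1).foldl
      (fun (st : PySem.Dict String Int × PySem.Set String) i =>
        if st.2.contains (PySem.Str.slice seq (some i) (some (i + L))) then st
        else (st.1.modify (PySem.Str.slice seq (some i) (some (i + L))) 0 (fun x => x + 1),
          st.2.add (PySem.Str.slice seq (some i) (some (i + L)))))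
      (cnt, PySem.Set.empty)).1
    = List.foldl bumpD cnt (freshList [] (subsRaw seq L)) := by
  have hmap :
      (PySem.List.pyRange 0 (PySem.Str.len seq - L + 1) 1).foldl
        (fun (st : PySem.Dict String Int × PySem.Set String) i =>
          if st.2.contains (PySem.Str.slice seq (some i) (some (i + L))) then st
          else (st.1.modify (PySem.Str.slice seq (some i) (some (i + L))) 0 (fun x => x + 1),
            st.2.add (PySem.Str.slice seq (some i) (some (i + L)))))
        (cnt, PySem.Set.empty)
      = (subsRaw seq L).foldl
          (fun (st : PySem.Dict String Int × PySem.Set String) m =>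
            if st.2.contains m then st
            else (st.1.modify m 0 (fun x => x + 1), st.2.add m))
          (cnt, PySem.Set.empty) := by
    rw [subsRaw, List.foldl_map]
  rw [hmap, pair_fold]
  rfl

lemma getD_cntA (sequences : List String) (L : Int) (m : String) :
    (cntA sequences L).getD m 0
      = (sequences.countP (fun s => decide (m ∈ subsRaw s L)) : Int) := by
  suffices h : ∀ (seqs : List String) (d : PySem.Dict String Int),
      (seqs.foldl (fun cnt seq => List.foldl bumpD cnt (freshList [] (subsRaw seq L))) d).getD m 0
        = d.getD m 0 + (seqs.countP (fun s => decide (m ∈ subsRaw s L)) : Int) by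
    rw [cntA, h]; simp
  intro seqs
  induction seqs with
  | nil => intro d; simp
  | cons s t ih =>
    intro d
    rw [List.foldl_cons, ih]
    have hb : (List.foldl bumpD d (freshList [] (subsRaw s L))).getD m 0
        = d.getD m 0 + (List.count m (freshList [] (subsRaw s L)) : Int) := by
      simpa [bumpD] using PySem.Dict.getD_foldl_modify_add_one (freshList [] (subsRaw s L)) d m
    rw [hb, count_freshList]
    by_cases h : m ∈ subsRaw s L <;> simp [h, List.countP_cons] <;> ring

lemma keys_cntA (sequences : List String) (L : Int) :
    (cntA sequences L).keys
      = sequences.foldl (fun K s => PySem.Set.update K (subsRaw s L)) [] := by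
  suffices h : ∀ (seqs : List String) (d : PySem.Dict String Int),
      (seqs.foldl (fun cnt seq => List.foldl bumpD cnt (freshList [] (subsRaw seq L))) d).keys
        = seqs.foldl (fun K s => PySem.Set.update K (subsRaw s L)) d.keys by
    rw [cntA, h]; simp [PySem.Dict.keys_empty]
  intro seqs
  induction seqs with
  | nil => intro d; simp
  | cons s t ih =>
    intro d
    rw [List.foldl_cons, ih, List.foldl_cons]
    congr 1
    have hk : (List.foldl bumpD d (freshList [] (subsRaw s L))).keys
        = PySem.Set.update d.keys (freshList [] (subsRaw s L)) := by
      simpa [bumpD] using PySem.Dict.keys_foldl_modify (freshList [] (subsRaw s L)) 0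
        (fun _ _ => (fun x => x + 1)) d
    rw [hk, freshList_nil_eq_ofList, PySem.Set.update_eq_append_filter,
      PySem.Set.update_eq_append_filter, PySem.Set.ofList_ofList]

lemma nodup_keys_cntA (sequences : List String) (L : Int) :
    (cntA sequences L).keys.Nodup := by
  rw [keys_cntA]
  suffices h : ∀ (seqs : List String) (K : PySem.Set String), K.Nodup →
      (seqs.foldl (fun K s => PySem.Set.update K (subsRaw s L)) K).Nodup by
    exact h sequences [] List.nodup_nil
  intro seqs
  induction seqs with
  | nil => intro K hK; simpa
  | cons s t ih => intro K hK; exact ih _ (PySem.Set.nodup_update _ _ hK)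

lemma fold_update_append (L : Int) (seqs : List String) :
    ∀ (K : PySem.Set String), ∃ T : List String,
      seqs.foldl (fun K s => PySem.Set.update K (subsRaw s L)) K = K ++ T ∧ ∀ t ∈ T, t ∉ K := by
  induction seqs with
  | nil => intro K; exact ⟨[], by simp⟩
  | cons s t ih =>
    intro K
    obtain ⟨T2, h2, hm2⟩ := ih (PySem.Set.update K (subsRaw s L))
    refine ⟨List.filter (fun y => !K.contains y) (PySem.Set.ofList (subsRaw s L)) ++ T2, ?_, ?_⟩
    · rw [List.foldl_cons, h2, PySem.Set.update_eq_append_filter, List.append_assoc]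
    · intro x hx
      rcases List.mem_append.mp hx with hx | hx
      · have := List.of_mem_filter hx
        rw [PySem.Set.contains_eq_decide] at this
        simpa using this
      · intro hK
        exact hm2 x hx (by
          rw [PySem.Set.update_eq_append_filter]
          exact List.mem_append_left _ hK)

-- the shared-motif set A computes for a fixed length L, rewritten
lemma sharedA_eq (s0 : String) (rest : List String) (L : Int) :
    PySem.Set.ofList
        (((cntA (s0 :: rest) L).items.filter
            (fun p => p.2 == ((s0 :: rest).length : Int))).map (fun p => p.1))
      = (motifSet s0 L).filter
          (fun m => rest.all (fun s => (motifSet s L).contains m)) := by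
  have hn := nodup_keys_cntA (s0 :: rest) L
  have hitems := PySem.Dict.items_eq_map_keys (cntA (s0 :: rest) L) hn (0 : Int)
  rw [hitems, List.filter_map, List.map_map]
  have hcomp :
      ((fun p : String × Int => p.1) ∘ fun k => (k, (cntA (s0 :: rest) L).getD k 0))
        = id := rfl
  rw [hcomp, List.map_id]
  -- keys decompose as ofList (subsRaw s0) ++ T with T disjoint from subsRaw s0
  have hkeys := keys_cntA (s0 :: rest) L
  rw [List.foldl_cons, PySem.Set.update_nil_left] at hkeys
  obtain ⟨T, hT, hTm⟩ := fold_update_append L rest (PySem.Set.ofList (subsRaw s0 L))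
  rw [hT] at hkeys
  rw [hkeys, List.filter_append]
  have hTnil : T.filter
      ((fun p : String × Int => p.2 == ((s0 :: rest).length : Int)) ∘
        fun k => (k, (cntA (s0 :: rest) L).getD k 0)) = [] := by
    rw [List.filter_eq_nil_iff]
    intro t ht
    have htm : t ∉ subsRaw s0 L := fun hm =>
      hTm t ht ((PySem.Set.mem_ofList _ _).mpr hm)
    simp only [Function.comp_apply, beq_iff_eq]
    rw [getD_cntA]
    have hle : rest.countP (fun s => decide (t ∈ subsRaw s L)) ≤ rest.length :=
      List.countP_le_length
    have hcnt : (s0 :: rest).countP (fun s => decide (t ∈ subsRaw s L))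
        = rest.countP (fun s => decide (t ∈ subsRaw s L)) := by
      simp [List.countP_cons, htm]
    rw [hcnt]
    simp only [List.length_cons]
    intro hEq
    have : rest.countP (fun s => decide (t ∈ subsRaw s L)) = rest.length + 1 := by
      exact_mod_cast hEq
    omega
  rw [hTnil, List.append_nil]
  have hfc : ∀ k ∈ PySem.Set.ofList (subsRaw s0 L),
      ((fun p : String × Int => p.2 == ((s0 :: rest).length : Int)) ∘
        fun k => (k, (cntA (s0 :: rest) L).getD k 0)) k
      = (fun m => rest.all (fun s => (motifSet s L).contains m)) k := by
    intro k hk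
    have hk0 : k ∈ subsRaw s0 L := (PySem.Set.mem_ofList _ _).mp hk
    have hcount : (s0 :: rest).countP (fun s => decide (k ∈ subsRaw s L))
        = rest.countP (fun s => decide (k ∈ subsRaw s L)) + 1 := by
      simp [List.countP_cons, hk0]
    simp only [Function.comp_apply, beq_iff_eq]
    rw [getD_cntA, Bool.eq_iff_iff]
    simp only [beq_iff_eq]
    constructor
    · intro hEq
      have h1 : (s0 :: rest).countP (fun s => decide (k ∈ subsRaw s L))
          = (s0 :: rest).length := by exact_mod_cast hEq
      rw [hcount, List.length_cons] at h1
      have hc : rest.countP (fun s => decide (k ∈ subsRaw s L)) = rest.length := by omega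
      rw [List.all_eq_true]
      intro s hs
      have hmem := (List.countP_eq_length).mp hc s hs
      rw [PySem.Set.contains_eq_decide]
      simp only [motifSet, PySem.Set.mem_ofList]
      simpa using hmem
    · intro hall
      have hc : rest.countP (fun s => decide (k ∈ subsRaw s L)) = rest.length := by
        apply List.countP_eq_length.mpr
        intro s hs
        have := List.all_eq_true.mp hall s hs
        rw [PySem.Set.contains_eq_decide] at this
        simp only [motifSet, PySem.Set.mem_ofList] at this
        simpa using this
      show ((((s0 :: rest).countP (fun s => decide (k ∈ subsRaw s L)) : Nat) : Int))
          = ((s0 :: rest).length : Int)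
      rw [hcount, List.length_cons, hc]
  rw [List.filter_congr hfc]
  exact PySem.Set.ofList_eq_self_of_nodup _
    ((PySem.Set.nodup_ofList (subsRaw s0 L)).filter _)

lemma foldl_inter (L : Int) (rest : List String) :
    ∀ (c : PySem.Set String),
      rest.foldl (fun c seq => c.inter (motifSet seq L)) c
        = c.filter (fun m => rest.all (fun s => (motifSet s L).contains m)) := by
  induction rest with
  | nil => intro c; simp
  | cons s t ih =>
    intro c
    rw [List.foldl_cons, ih]
    show (PySem.Set.inter c (motifSet s L)).filter _ = _
    rw [PySem.Set.inter, List.filter_filter]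
    apply List.filter_congr
    intro m _
    simp [Bool.and_comm]

lemma shared_eq_common (s0 : String) (rest : List String) (L : Int) :
    PySem.Set.ofList
        (((cntA (s0 :: rest) L).items.filter
            (fun p => p.2 == ((s0 :: rest).length : Int))).map (fun p => p.1))
      = rest.foldl (fun c seq => c.inter (motifSet seq L)) (motifSet s0 L) := by
  rw [sharedA_eq, foldl_inter]

lemma foldl_ext {A B : Type} (f g : A → B → A) (h : ∀ a b, f a b = g a b) :
    ∀ (l : List B) (a : A), l.foldl f a = l.foldl g a := by
  intro l
  induction l with
  | nil => intro a; rfl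
  | cons x t ih => intro a; rw [List.foldl_cons, List.foldl_cons, h]; exact ih _

lemma foldl_id {A B : Type} (f : A → B → A) (h : ∀ a b, f a b = a) :
    ∀ (l : List B) (a : A), l.foldl f a = a := by
  intro l
  induction l with
  | nil => intro a; rfl
  | cons x t ih => intro a; rw [List.foldl_cons, h]; exact ih _

-- ===== VERDICT (by name: the statement is the Claim_ definition above) =====
theorem find_motifs_spec : Claim_equal_find_motifs := by
  intro sequences min_length max_length _hDom
  unfold Spec_find_motifs
  cases sequences with
  | nil =>
    unfold find_motifs find_motifs_alt
    exact congrArg PySem.Dict.items (foldl_id _ (fun all L => rfl) _ _)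
  | cons s0 rest =>
    unfold find_motifs find_motifs_alt
    refine congrArg PySem.Dict.items (foldl_ext _ _ ?_ _ _)
    intro all L
    have hcnt :
        (s0 :: rest).foldl
          (fun cnt seq =>
            ((PySem.List.pyRange 0 (PySem.Str.len seq - L + 1) 1).foldl
              (fun (st : PySem.Dict String Int × PySem.Set String) i =>
                if st.2.contains (PySem.Str.slice seq (some i) (some (i + L))) then st
                else (st.1.modify (PySem.Str.slice seq (some i) (some (i + L))) 0 (fun x => x + 1),
                  st.2.add (PySem.Str.slice seq (some i) (some (i + L)))))
              (cnt, PySem.Set.empty)).1)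
          PySem.Dict.empty
        = cntA (s0 :: rest) L := by
      unfold cntA
      congr 1
      funext cnt seq
      exact innerA seq L cnt
    dsimp only
    rw [hcnt, shared_eq_common s0 rest L]
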